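-- pv_equiv track=rewrite | github.com/pypi-data/pypi-mirror-391 | packages/telugu-language-tools/telugu_language_tools-6.0.5.tar.gz/telugu_language_tools-6.0.5/telugu_engine/combo_pipeline.py | combine_letter_matches_to_words
-- ===== SOURCE A (Python) =====
-- from typing import List, Dict, Tuple
-- import itertools
--
-- def combine_letter_matches_to_words(letter_matches: List[List[str]], cap: int = 2000) -> List[str]:
--     """
--     Combine letter-level matches (cartesian product) into word variants.
--     cap: safety limit on number of combinations returned. If exceeded, we return
--          the top lexicographically-first results up to cap.
--     """
--     # count combos
--     total = 1
--     for lst in letter_matches: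
--         total *= max(1, len(lst))
--
--     if total > cap:
--         # to avoid explosion, we produce deterministic partial combinations:
--         # take the first candidate from the first N-1 letters and iterate last
--         results = []
--         # build iterators that are truncated to small sizes
--         truncated = [lst if len(lst) <= 4 else lst[:4] for lst in letter_matches]
--         for prod in itertools.islice(itertools.product(*truncated), cap):
--             results.append("".join(prod))
--         return results
--
--     return ["".join(prod) for prod in itertools.product(*letter_matches)]
-- ===== SOURCE B (Python) =====
-- def combine_letter_matches_to_words(letter_matches, cap=2000):
--     total = 1
--     for lst in letter_matches:
--         total *= max(1, len(lst))
--     if total > cap: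
--         effective = [lst[:4] for lst in letter_matches]
--         limit = cap
--     else:
--         effective = letter_matches
--         limit = total
--     # fwd[pos] = (lst, suffix_product_of_lengths_after_pos, len(lst))
--     fwd = []
--     p = 1
--     for lst in reversed(effective):
--         fwd.append((lst, p, len(lst)))
--         p *= len(lst)
--     fwd.reverse()
--     actual_n = p
--     join = "".join
--     return [join([lst[(i // sp) % L] for lst, sp, L in fwd])
--             for i in range(min(actual_n, limit))]
-- ===== Notes on version B (the rewrite author's own statement) =====
-- stated objective: alternative
-- what changed: Replaces itertools.product + islice with direct mixed-radix decoding of each output index (last list varies fastest), enumerating exactly min(count, limit) words; same total/truncation logic, no itertools.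
import Mathlib
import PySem

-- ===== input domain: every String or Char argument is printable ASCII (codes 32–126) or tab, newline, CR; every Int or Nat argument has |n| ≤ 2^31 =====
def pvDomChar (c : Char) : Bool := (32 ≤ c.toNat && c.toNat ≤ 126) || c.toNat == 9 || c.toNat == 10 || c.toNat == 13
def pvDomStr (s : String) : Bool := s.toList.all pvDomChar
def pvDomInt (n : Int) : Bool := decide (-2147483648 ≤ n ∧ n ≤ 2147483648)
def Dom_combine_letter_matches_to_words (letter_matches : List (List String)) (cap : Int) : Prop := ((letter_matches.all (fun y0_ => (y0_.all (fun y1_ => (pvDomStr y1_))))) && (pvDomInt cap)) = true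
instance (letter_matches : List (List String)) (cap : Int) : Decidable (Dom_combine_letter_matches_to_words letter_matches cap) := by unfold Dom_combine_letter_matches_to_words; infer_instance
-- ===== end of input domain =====

-- B replaces itertools.product/islice with mixed-radix decoding of each output index
-- (last list varies fastest), enumerating only min(count, limit) words directly;
-- equivalence is about the return value, neither version mutates its arguments.

-- ===== PORT A =====
-- itertools.product(*lists): first list outermost, last list varies fastest.
def pvProductA : List (List String) → List (List String)
  | [] => [[]]
  | l :: ls => l.flatMap (fun x => (pvProductA ls).map (fun rest => x :: rest))

def combine_letter_matches_to_words (letter_matches : List (List String)) (cap : Int) : List String :=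
  let total := letter_matches.foldl (fun t lst => t * max 1 (lst.length : Int)) 1
  if total > cap then
    let truncated := letter_matches.map (fun lst =>
      if lst.length ≤ 4 then lst else PySem.List.slice lst none (some 4))
    -- itertools.islice(_, cap): take cap elements; cap < 0 raises ValueError (excluded by Pre_)
    ((pvProductA truncated).map (fun prod => PySem.Str.join "" prod)).take cap.toNat
  else
    (pvProductA letter_matches).map (fun prod => PySem.Str.join "" prod)

-- ===== PORT B =====
def combine_letter_matches_to_words_alt (letter_matches : List (List String)) (cap : Int) : List String :=
  let total := letter_matches.foldl (fun t lst => t * max 1 (lst.length : Int)) 1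
  let effLimit : List (List String) × Int :=
    if total > cap then (letter_matches.map (fun lst => lst.take 4), cap)
    else (letter_matches, total)
  let effective := effLimit.1
  let limit := effLimit.2
  -- for lst in reversed(effective): fwd.append((lst, p, len(lst))); p *= len(lst)
  let st := effective.reverse.foldl
    (fun (st : List (List String × Nat × Nat) × Nat) lst =>
      (st.1 ++ [(lst, st.2, lst.length)], st.2 * lst.length)) ([], 1)
  let fwd := st.1.reverse
  let actualN := st.2
  (List.range (min (actualN : Int) limit).toNat).map (fun i =>
    PySem.Str.join "" (fwd.map (fun t => t.1.getD ((i / t.2.1) % t.2.2) "")))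

-- ===== PRECONDITION & SPEC =====
-- Pre_ excludes cap < 0, where A raises ValueError (itertools.islice rejects a negative stop).
def Pre_combine_letter_matches_to_words (letter_matches : List (List String)) (cap : Int) : Prop := 0 ≤ cap
instance (letter_matches : List (List String)) (cap : Int) : Decidable (Pre_combine_letter_matches_to_words letter_matches cap) := by unfold Pre_combine_letter_matches_to_words; infer_instance
def pvWitness_combine_letter_matches_to_words : List (List String) × Int := ([["a", "b"], ["c"]], 10)

def Spec_combine_letter_matches_to_words (letter_matches : List (List String)) (cap : Int) (out : List String) : Prop := out = combine_letter_matches_to_words_alt letter_matches cap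
instance (letter_matches : List (List String)) (cap : Int) (out : List String) : Decidable (Spec_combine_letter_matches_to_words letter_matches cap out) := by unfold Spec_combine_letter_matches_to_words; infer_instance

-- ===== CLAIM (what is proved, stated in full; the proofs are below) =====
def Claim_equal_combine_letter_matches_to_words : Prop := ∀ (letter_matches : List (List String)) (cap : Int), Dom_combine_letter_matches_to_words letter_matches cap → Pre_combine_letter_matches_to_words letter_matches cap → Spec_combine_letter_matches_to_words letter_matches cap (combine_letter_matches_to_words letter_matches cap)

-- ===== LEMMAS AND PROOFS =====

-- product of real lengths
def pvP (ls : List (List String)) : Nat := ls.foldr (fun l p => l.length * p) 1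
-- product of max(1, length)
def pvPM (ls : List (List String)) : Nat := ls.foldr (fun l p => max 1 l.length * p) 1

-- structural form of B's reversed divmod loop: digits in order, most significant first
def pvDec : List (List String) → Nat → Nat × List String
  | [], i => (i, [])
  | l :: ls, i =>
      let r := pvDec ls i
      (r.1 / l.length, l.getD (r.1 % l.length) "" :: r.2)

def pvFwd : List (List String) → List (List String × Nat × Nat)
  | [] => []
  | l :: ls => (l, pvP ls, l.length) :: pvFwd ls

theorem fold_fwd (eff : List (List String)) :
    eff.reverse.foldl
      (fun (st : List (List String × Nat × Nat) × Nat) lst =>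
        (st.1 ++ [(lst, st.2, lst.length)], st.2 * lst.length)) ([], 1)
    = ((pvFwd eff).reverse, pvP eff) := by
  induction eff with
  | nil => simp [pvFwd, pvP]
  | cons l ls ih =>
    rw [List.reverse_cons, List.foldl_append, ih]
    simp only [List.foldl_cons, List.foldl_nil, pvFwd, List.reverse_cons, pvP,
      List.foldr_cons]
    exact congrArg (Prod.mk _) (Nat.mul_comm _ _)

theorem pvDec_fst (ls : List (List String)) (j : Nat) : (pvDec ls j).1 = j / pvP ls := by
  induction ls generalizing j with
  | nil => simp [pvDec, pvP]
  | cons l ls ih =>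
    simp only [pvDec, pvP, List.foldr_cons, ih]
    rw [Nat.div_div_eq_div_mul, Nat.mul_comm l.length]

theorem map_fwd_eq_dec (eff : List (List String)) (i : Nat) :
    (pvFwd eff).map (fun t => t.1.getD ((i / t.2.1) % t.2.2) "") = (pvDec eff i).2 := by
  induction eff with
  | nil => simp [pvFwd, pvDec]
  | cons l ls ih => simp only [pvFwd, List.map_cons, pvDec, pvDec_fst, ih]

theorem pvP_pos (ls : List (List String)) (h : ∀ l ∈ ls, l ≠ []) : 0 < pvP ls := by
  induction ls with
  | nil => simp [pvP]
  | cons l ls ih =>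
    have hl : l ≠ [] := h l (by simp)
    have : 0 < l.length := List.length_pos_iff.mpr hl
    have := ih (fun x hx => h x (List.mem_cons_of_mem _ hx))
    simp only [pvP, List.foldr_cons] at *
    exact Nat.mul_pos ‹0 < l.length› this

theorem pvDec_shift (ls : List (List String)) (h : ∀ l ∈ ls, l ≠ []) (a j : Nat) :
    (pvDec ls (a * pvP ls + j)).2 = (pvDec ls j).2 := by
  induction ls generalizing a j with
  | nil => simp [pvDec]
  | cons l ls ih =>
    have hrest : ∀ x ∈ ls, x ≠ [] := fun x hx => h x (List.mem_cons_of_mem _ hx)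
    have hP : 0 < pvP ls := pvP_pos ls hrest
    have harg : a * pvP (l :: ls) + j = (a * l.length) * pvP ls + j := by
      simp only [pvP, List.foldr_cons]; ring
    simp only [pvDec, harg, pvDec_fst]
    have h1 : (a * l.length * pvP ls + j) / pvP ls = a * l.length + j / pvP ls := by
      rw [Nat.mul_comm (a * l.length), Nat.mul_add_div hP]
    rw [h1, Nat.add_comm (a * l.length), Nat.add_mul_mod_self_right,
      ih hrest (a * l.length) j]

theorem flatMap_range (l : List String) (g : String → List (List String)) :
    l.flatMap g = (List.range l.length).flatMap (fun a => g (l.getD a "")) := by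
  induction l with
  | nil => simp
  | cons x xs ih => simp [List.range_succ_eq_map, List.flatMap_map, ih]

theorem range_mul_flatMap (L P : Nat) (f : Nat → List String) :
    (List.range (L * P)).map f
      = (List.range L).flatMap (fun a => (List.range P).map (fun j => f (a * P + j))) := by
  induction L with
  | zero => simp
  | succ L ih =>
    rw [Nat.succ_mul, List.range_add, List.map_append, ih, List.range_succ,
      List.flatMap_append]
    simp [List.map_map, Function.comp]

theorem product_eq_range (eff : List (List String)) (h : ∀ l ∈ eff, l ≠ []) :
    pvProductA eff = (List.range (pvP eff)).map (fun i => (pvDec eff i).2) := by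
  induction eff with
  | nil => simp [pvProductA, pvP, pvDec, List.range_succ]
  | cons l ls ih =>
    have hl : l ≠ [] := h l (by simp)
    have hrest : ∀ x ∈ ls, x ≠ [] := fun x hx => h x (List.mem_cons_of_mem _ hx)
    have hP : 0 < pvP ls := pvP_pos ls hrest
    have hPc : pvP (l :: ls) = l.length * pvP ls := by simp [pvP]
    rw [hPc, range_mul_flatMap]
    simp only [pvProductA, ih hrest, List.map_map]
    rw [flatMap_range l]
    apply List.flatMap_congr
    intro a ha
    rw [List.mem_range] at ha
    apply List.map_congr_left
    intro j hj
    rw [List.mem_range] at hj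
    simp only [Function.comp_apply, pvDec, pvDec_fst]
    have h1 : (a * pvP ls + j) / pvP ls = a + j / pvP ls := by
      rw [Nat.mul_comm a, Nat.mul_add_div hP]
    have h2 : j / pvP ls = 0 := Nat.div_eq_of_lt hj
    rw [h1, h2, Nat.add_zero, Nat.mod_eq_of_lt ha, pvDec_shift ls hrest a j]

theorem product_nil_of_empty (eff : List (List String)) (h : ¬ ∀ l ∈ eff, l ≠ []) :
    pvProductA eff = [] := by
  induction eff with
  | nil => exact absurd (by simp) h
  | cons l ls ih =>
    by_cases hl : l = []
    · simp [pvProductA, hl]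
    · have : ¬ ∀ x ∈ ls, x ≠ [] := by
        intro hall; exact h (by
          intro x hx
          rcases List.mem_cons.mp hx with rfl | hx'
          · exact hl
          · exact hall x hx')
      simp [pvProductA, ih this]

theorem pvP_zero_of_empty (eff : List (List String)) (h : ¬ ∀ l ∈ eff, l ≠ []) :
    pvP eff = 0 := by
  induction eff with
  | nil => exact absurd (by simp) h
  | cons l ls ih =>
    by_cases hl : l = []
    · simp [pvP, hl]
    · have : ¬ ∀ x ∈ ls, x ≠ [] := by
        intro hall; exact h (by
          intro x hx
          rcases List.mem_cons.mp hx with rfl | hx'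
          · exact hl
          · exact hall x hx')
      simp [pvP, List.foldr_cons]
      right
      simpa [pvP] using ih this

theorem foldl_mul_int (g : List String → Nat) :
    ∀ (ls : List (List String)) (t : Int),
      ls.foldl (fun t l => t * (g l : Int)) t = t * ((ls.foldr (fun l p => g l * p) 1 : Nat) : Int) := by
  intro ls
  induction ls with
  | nil => intro t; simp
  | cons l ls ih =>
    intro t
    simp only [List.foldl_cons, List.foldr_cons, ih]
    push_cast
    ring

theorem total_eq (ls : List (List String)) :
    ls.foldl (fun t lst => t * max 1 (lst.length : Int)) 1 = (pvPM ls : Int) := by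
  have hmax : ∀ (n : Nat), max 1 (n : Int) = ((max 1 n : Nat) : Int) := by
    intro n; simp [Nat.cast_max]
  simp only [hmax]
  rw [foldl_mul_int (fun l => max 1 l.length) ls 1, one_mul]
  rfl

theorem pvP_le_pvPM (ls : List (List String)) : pvP ls ≤ pvPM ls := by
  induction ls with
  | nil => simp [pvP, pvPM]
  | cons l ls ih =>
    simp only [pvP, pvPM, List.foldr_cons] at *
    exact Nat.mul_le_mul (by omega) ih

theorem combine_letter_matches_to_words_spec : Claim_equal_combine_letter_matches_to_words := by
  intro lm cap _ hpre
  unfold Pre_combine_letter_matches_to_words at hpre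
  unfold Spec_combine_letter_matches_to_words
  simp only [combine_letter_matches_to_words, combine_letter_matches_to_words_alt,
    total_eq, fold_fwd, List.reverse_reverse, map_fwd_eq_dec]
  split_ifs with hgt
  · -- truncated branch
    dsimp only
    have htr : lm.map (fun l => if l.length ≤ 4 then l else PySem.List.slice l none (some 4))
        = lm.map (fun l => l.take 4) := by
      apply List.map_congr_left
      intro l _
      split_ifs with h4
      · exact (List.take_of_length_le h4).symm
      · rw [PySem.List.slice_to _ (by norm_num)]
        rfl
    rw [htr]
    set eff := lm.map (fun l => l.take 4) with heffdef
    by_cases hne : ∀ l ∈ lm, l ≠ []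
    · have heff : ∀ l ∈ eff, l ≠ [] := by
        intro l hl
        rcases List.mem_map.mp hl with ⟨x, hx, rfl⟩
        have hx0 : 0 < x.length := List.length_pos_iff.mpr (hne x hx)
        have : 0 < (x.take 4).length := by simp [List.length_take]; omega
        exact List.length_pos_iff.mp this
      rw [product_eq_range eff heff, List.map_map, ← List.map_take, List.take_range]
      have hmin2 : (min ((pvP eff : Nat) : Int) cap).toNat = min cap.toNat (pvP eff) := by
        omega
      rw [hmin2]
      simp [Function.comp]
    · have hbad : ¬ ∀ l ∈ eff, l ≠ [] := by
        intro hall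
        apply hne
        intro l hl hnil
        exact hall ([] : List String) (by
          rw [heffdef]
          exact List.mem_map.mpr ⟨l, hl, by simp [hnil]⟩) rfl
      rw [product_nil_of_empty eff hbad, pvP_zero_of_empty eff hbad]
      simp
  · -- full branch
    dsimp only
    have hle : ((pvP lm : Nat) : Int) ≤ ((pvPM lm : Nat) : Int) := by
      exact_mod_cast pvP_le_pvPM lm
    have hmin : (min ((pvP lm : Nat) : Int) ((pvPM lm : Nat) : Int)).toNat = pvP lm := by
      omega
    rw [hmin]
    by_cases hne : ∀ l ∈ lm, l ≠ []
    · rw [product_eq_range lm hne, List.map_map]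
      simp [Function.comp]
    · rw [product_nil_of_empty lm hne, pvP_zero_of_empty lm hne]
      simp
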